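-- pv_equiv track=rewrite | github.com/laasya2505/reddit-persona | reddit_persona.py | analyze_interests_and_personality
-- ===== SOURCE A (Python) =====
-- from collections import Counter, defaultdict
--
-- def analyze_interests_and_personality(posts, comments):
--     """Analyze interests and personality traits"""
--     all_text = ' '.join([
--         (item.get('title', '') + ' ' + item.get('content', ''))
--         for item in posts + comments
--     ]).lower()
--
--     citations = defaultdict(list)
--
--     # Interest categories
--     interest_keywords = {
--         'gaming': ['game', 'gaming', 'steam', 'console', 'pc', 'xbox', 'playstation', 'nintendo'],
--         'tech': ['programming', 'code', 'software', 'computer', 'tech', 'developer', 'python', 'javascript'],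
--         'fitness': ['gym', 'workout', 'exercise', 'fitness', 'running', 'lifting', 'diet', 'protein'],
--         'food': ['cooking', 'recipe', 'food', 'restaurant', 'chef', 'kitchen', 'meal', 'dinner'],
--         'travel': ['travel', 'trip', 'vacation', 'flight', 'hotel', 'country', 'city', 'tourist'],
--         'entertainment': ['movie', 'film', 'tv', 'show', 'netflix', 'actor', 'music', 'band'],
--         'education': ['university', 'college', 'degree', 'professor', 'study', 'exam', 'homework'],
--         'finance': ['money', 'investment', 'stock', 'crypto', 'bitcoin', 'salary', 'budget', 'savings']
--     }
--
--     interests = {}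
--     for category, keywords in interest_keywords.items():
--         count = sum(all_text.count(keyword) for keyword in keywords)
--         if count > 0:
--             interests[category] = count
--
--             # Find citations
--             for item in posts + comments:
--                 text = (item.get('title', '') + ' ' + item.get('content', '')).lower()
--                 for keyword in keywords:
--                     if keyword in text:
--                         citations[f'interest_{category}'].append({
--                             'text': text[:200] + '...' if len(text) > 200 else text,
--                             'url': item.get('url', ''),
--                             'keyword': keyword
--                         })
--                         break
--
--     # Personality traits (basic sentiment analysis)
--     personality_indicators = {
--         'helpful': ['help', 'advice', 'recommend', 'suggest', 'guide', 'explain'],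
--         'humorous': ['lol', 'haha', 'funny', 'joke', 'hilarious', 'lmao'],
--         'analytical': ['analyze', 'data', 'statistics', 'research', 'study', 'evidence'],
--         'creative': ['art', 'design', 'creative', 'original', 'innovative', 'artistic'],
--         'social': ['friend', 'community', 'social', 'group', 'together', 'meetup']
--     }
--
--     personality = {}
--     for trait, indicators in personality_indicators.items():
--         count = sum(all_text.count(indicator) for indicator in indicators)
--         if count > 0:
--             personality[trait] = count
--
--     return interests, personality, citations
-- ===== SOURCE B (Python) =====
-- def analyze_interests_and_personality(posts, comments):
--     """Analyze interests and personality traits"""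
--     interest_keywords = {
--         'gaming': ['game', 'gaming', 'steam', 'console', 'pc', 'xbox', 'playstation', 'nintendo'],
--         'tech': ['programming', 'code', 'software', 'computer', 'tech', 'developer', 'python', 'javascript'],
--         'fitness': ['gym', 'workout', 'exercise', 'fitness', 'running', 'lifting', 'diet', 'protein'],
--         'food': ['cooking', 'recipe', 'food', 'restaurant', 'chef', 'kitchen', 'meal', 'dinner'],
--         'travel': ['travel', 'trip', 'vacation', 'flight', 'hotel', 'country', 'city', 'tourist'],
--         'entertainment': ['movie', 'film', 'tv', 'show', 'netflix', 'actor', 'music', 'band'],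
--         'education': ['university', 'college', 'degree', 'professor', 'study', 'exam', 'homework'],
--         'finance': ['money', 'investment', 'stock', 'crypto', 'bitcoin', 'salary', 'budget', 'savings']
--     }
--     personality_indicators = {
--         'helpful': ['help', 'advice', 'recommend', 'suggest', 'guide', 'explain'],
--         'humorous': ['lol', 'haha', 'funny', 'joke', 'hilarious', 'lmao'],
--         'analytical': ['analyze', 'data', 'statistics', 'research', 'study', 'evidence'],
--         'creative': ['art', 'design', 'creative', 'original', 'innovative', 'artistic'],
--         'social': ['friend', 'community', 'social', 'group', 'together', 'meetup']
--     }
--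
--     # Single item-major pass: no joined all_text at all.  Keyword occurrences cannot
--     # span the ' '-join boundary (no keyword contains a space), so summing per-item
--     # counts equals counting in the joined text.
--     itotals = {c: 0 for c in interest_keywords}
--     ptotals = {t: 0 for t in personality_indicators}
--     hits = {c: [] for c in interest_keywords}
--     for item in posts + comments:
--         text = (item.get('title', '') + ' ' + item.get('content', '')).lower()
--         snippet = text[:200] + '...' if len(text) > 200 else text
--         for cat, kws in interest_keywords.items():
--             itotals[cat] += sum(text.count(k) for k in kws)
--             for kw in kws:
--                 if kw in text:
--                     hits[cat].append({'text': snippet, 'url': item.get('url', ''), 'keyword': kw})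
--                     break
--         for trait, kws in personality_indicators.items():
--             ptotals[trait] += sum(text.count(k) for k in kws)
--
--     interests = {c: n for c, n in itotals.items() if n > 0}
--     personality = {t: n for t, n in ptotals.items() if n > 0}
--     citations = {'interest_' + c: hits[c] for c in interests if hits[c]}
--     return interests, personality, citations
-- ===== Notes on version B (the rewrite author's own statement) =====
-- stated objective: alternative
-- what changed: B never builds the joined all_text: a single item-major pass lowers each item's text once and accumulates per-category counts and citation hits into preset dicts (sound because no keyword contains a space, so no occurrence can span the ' '-join boundary), and the result dicts are then read off by filtering the accumulated totals, instead of A's category-major rescan that joins all texts, counts in the joined string, and re-lowers every item per matching category.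
import Mathlib
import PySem

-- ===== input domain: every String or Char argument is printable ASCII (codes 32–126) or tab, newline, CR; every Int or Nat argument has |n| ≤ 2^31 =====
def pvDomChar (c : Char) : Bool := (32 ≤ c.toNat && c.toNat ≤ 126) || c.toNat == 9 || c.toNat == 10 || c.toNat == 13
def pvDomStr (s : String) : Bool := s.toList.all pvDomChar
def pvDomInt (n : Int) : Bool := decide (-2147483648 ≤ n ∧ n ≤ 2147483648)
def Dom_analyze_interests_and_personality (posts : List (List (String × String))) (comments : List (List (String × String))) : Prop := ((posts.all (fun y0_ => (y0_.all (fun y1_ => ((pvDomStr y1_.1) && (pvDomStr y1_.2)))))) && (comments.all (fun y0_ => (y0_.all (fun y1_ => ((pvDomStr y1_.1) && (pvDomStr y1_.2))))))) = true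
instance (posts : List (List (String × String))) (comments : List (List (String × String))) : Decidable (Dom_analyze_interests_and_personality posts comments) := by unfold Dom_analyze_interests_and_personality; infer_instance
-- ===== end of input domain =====

-- B never builds the joined all_text: one item-major pass accumulates per-category counts
-- and citation hits into preset dicts (sound because no keyword contains a space, so no
-- occurrence spans the ' '-join boundary); objective: alternative algorithm, same cost class.

-- shared helpers (each used by both ports for the identical Python expression)
def pvGetD (it : List (String × String)) (k : String) : String :=
  (PySem.Dict.mk it).getD k ""

def textOf (it : List (String × String)) : String :=
  pvGetD it "title" ++ " " ++ pvGetD it "content"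

-- 'for keyword in keywords: if keyword in text: …; break'
def firstKw : List String → String → Option String
  | [], _ => none
  | k :: ks, t => if PySem.Str.isIn k t then some k else firstKw ks t

def mkCit (text url kw : String) : List (String × String) :=
  [("text", if PySem.Str.len text > 200 then PySem.Str.slice text none (some 200) ++ "..." else text),
   ("url", url), ("keyword", kw)]

-- sum(text.count(k) for k in keywords)
def kwCount (text : String) (kws : List String) : Int :=
  (kws.map (fun kw => (PySem.Str.count text kw : Int))).sum

def interestKeywords : List (String × List String) :=
  [("gaming", ["game", "gaming", "steam", "console", "pc", "xbox", "playstation", "nintendo"]),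
   ("tech", ["programming", "code", "software", "computer", "tech", "developer", "python", "javascript"]),
   ("fitness", ["gym", "workout", "exercise", "fitness", "running", "lifting", "diet", "protein"]),
   ("food", ["cooking", "recipe", "food", "restaurant", "chef", "kitchen", "meal", "dinner"]),
   ("travel", ["travel", "trip", "vacation", "flight", "hotel", "country", "city", "tourist"]),
   ("entertainment", ["movie", "film", "tv", "show", "netflix", "actor", "music", "band"]),
   ("education", ["university", "college", "degree", "professor", "study", "exam", "homework"]),
   ("finance", ["money", "investment", "stock", "crypto", "bitcoin", "salary", "budget", "savings"])]

def personalityIndicators : List (String × List String) :=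
  [("helpful", ["help", "advice", "recommend", "suggest", "guide", "explain"]),
   ("humorous", ["lol", "haha", "funny", "joke", "hilarious", "lmao"]),
   ("analytical", ["analyze", "data", "statistics", "research", "study", "evidence"]),
   ("creative", ["art", "design", "creative", "original", "innovative", "artistic"]),
   ("social", ["friend", "community", "social", "group", "together", "meetup"])]

-- ===== PORT A =====
def analyze_interests_and_personality (posts : List (List (String × String))) (comments : List (List (String × String))) : (List (String × Int)) × (List (String × Int)) × (List (String × List (List (String × String)))) :=
  let items := posts ++ comments
  let all_text := PySem.Str.lower (PySem.Str.join " " (items.map (fun item => textOf item)))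
  let st := interestKeywords.foldl (fun (st : PySem.Dict String Int × PySem.Dict String (List (List (String × String)))) ck =>
      let count := kwCount all_text ck.2
      if count > 0 then
        let ints := st.1.insert ck.1 count
        let cits := items.foldl (fun cits item =>
            let text := PySem.Str.lower (textOf item)
            match firstKw ck.2 text with
            | some kw => cits.modify ("interest_" ++ ck.1) [] (fun l => l ++ [mkCit text (pvGetD item "url") kw])
            | none => cits) st.2
        (ints, cits)
      else st) (PySem.Dict.empty, PySem.Dict.empty)
  let personality := personalityIndicators.foldl (fun (d : PySem.Dict String Int) ti =>
      let count := kwCount all_text ti.2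
      if count > 0 then d.insert ti.1 count else d) PySem.Dict.empty
  (st.1.items, personality.items, st.2.items)

-- ===== PORT B =====
def analyze_interests_and_personality_alt (posts : List (List (String × String))) (comments : List (List (String × String))) : (List (String × Int)) × (List (String × Int)) × (List (String × List (List (String × String)))) :=
  let itotals0 : PySem.Dict String Int := interestKeywords.foldl (fun d ck => d.insert ck.1 0) PySem.Dict.empty
  let ptotals0 : PySem.Dict String Int := personalityIndicators.foldl (fun d ti => d.insert ti.1 0) PySem.Dict.empty
  let hits0 : PySem.Dict String (List (List (String × String))) := interestKeywords.foldl (fun d ck => d.insert ck.1 []) PySem.Dict.empty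
  let st := (posts ++ comments).foldl (fun (st : PySem.Dict String Int × PySem.Dict String Int × PySem.Dict String (List (List (String × String)))) item =>
      let text := PySem.Str.lower (textOf item)
      let snippet := if PySem.Str.len text > 200 then PySem.Str.slice text none (some 200) ++ "..." else text
      let ih := interestKeywords.foldl (fun (p : PySem.Dict String Int × PySem.Dict String (List (List (String × String)))) ck =>
          (p.1.modify ck.1 0 (fun n => n + kwCount text ck.2),
           match firstKw ck.2 text with
           | some kw => p.2.modify ck.1 [] (fun l => l ++ [[("text", snippet), ("url", pvGetD item "url"), ("keyword", kw)]])
           | none => p.2)) (st.1, st.2.2)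
      let pt := personalityIndicators.foldl (fun (d : PySem.Dict String Int) ti => d.modify ti.1 0 (fun n => n + kwCount text ti.2)) st.2.1
      (ih.1, pt, ih.2)) (itotals0, ptotals0, hits0)
  let interests := st.1.items.foldl (fun (d : PySem.Dict String Int) p => if p.2 > 0 then d.insert p.1 p.2 else d) PySem.Dict.empty
  let personality := st.2.1.items.foldl (fun (d : PySem.Dict String Int) p => if p.2 > 0 then d.insert p.1 p.2 else d) PySem.Dict.empty
  let citations := interests.keys.foldl (fun (d : PySem.Dict String (List (List (String × String)))) c =>
      let h := st.2.2.getD c []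
      if h ≠ [] then d.insert ("interest_" ++ c) h else d) PySem.Dict.empty
  (interests.items, personality.items, citations.items)

-- ===== PRECONDITION & SPEC =====
def Spec_analyze_interests_and_personality (posts : List (List (String × String))) (comments : List (List (String × String))) (out : (List (String × Int)) × (List (String × Int)) × (List (String × List (List (String × String))))) : Prop := out = analyze_interests_and_personality_alt posts comments
-- helper instance assembly (the one-shot infer_instance search exceeds the default synth depth on this triple type)
def pvDecR : DecidableEq ((List (String × Int)) × (List (String × Int)) × (List (String × List (List (String × String))))) :=
  @instDecidableEqProd _ _ inferInstance (@instDecidableEqProd _ _ inferInstance inferInstance)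
instance (posts : List (List (String × String))) (comments : List (List (String × String))) (out : (List (String × Int)) × (List (String × Int)) × (List (String × List (List (String × String))))) : Decidable (Spec_analyze_interests_and_personality posts comments out) := by unfold Spec_analyze_interests_and_personality; exact pvDecR _ _

-- ===== CLAIM (what is proved, stated in full; the proofs are below) =====
def Claim_equal_analyze_interests_and_personality : Prop := ∀ (posts : List (List (String × String))) (comments : List (List (String × String))), Dom_analyze_interests_and_personality posts comments → Spec_analyze_interests_and_personality posts comments (analyze_interests_and_personality posts comments)

-- ===== LEMMAS AND PROOFS =====

def lowText (it : List (String × String)) : String := PySem.Str.lower (textOf it)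

def citOf (kws : List String) (it : List (String × String)) : Option (List (String × String)) :=
  (firstKw kws (lowText it)).map (fun kw => mkCit (lowText it) (pvGetD it "url") kw)

def allTextOf (items : List (List (String × String))) : String :=
  PySem.Str.lower (PySem.Str.join " " (items.map (fun item => textOf item)))

-- Σ over items of the per-item keyword count of one category
def Ttot (items : List (List (String × String))) (kws : List String) : Int :=
  (items.map (fun it => kwCount (lowText it) kws)).sum

-- the citation list of one category
def Ltot (kws : List String) (items : List (List (String × String))) : List (List (String × String)) :=
  items.filterMap (citOf kws)

-- ---------- counting: Python's non-overlapping str.count as a structural recursion ----------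

def cntOcc (sub : List Char) : List Char → Nat
  | [] => 0
  | h :: t =>
    if sub.isPrefixOf (h :: t) then cntOcc sub (t.drop (sub.length - 1)) + 1
    else cntOcc sub t
termination_by l => l.length
decreasing_by
  · simp only [List.length_drop, List.length_cons]; omega
  · simp

theorem go_succ_cons (sub : List Char) (n acc : Nat) (h : Char) (t : List Char) :
    PySem.Chars.count.go sub (n+1) (h :: t) acc
      = if sub.isPrefixOf (h :: t) = true then
          PySem.Chars.count.go sub n (List.drop sub.length (h :: t)) (acc + 1)
        else PySem.Chars.count.go sub n t acc := by
  rw [PySem.Chars.count.go.eq_def]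

theorem go_eq_cntOcc (sub : List Char) (hs : sub ≠ []) :
    ∀ (fuel : Nat) (l : List Char) (acc : Nat), l.length ≤ fuel →
      PySem.Chars.count.go sub fuel l acc = acc + cntOcc sub l := by
  intro fuel
  induction fuel with
  | zero =>
    intro l acc hl
    have hnil : l = [] := List.eq_nil_of_length_eq_zero (Nat.le_zero.mp hl)
    subst hnil
    rw [PySem.Chars.count.go.eq_def]
    simp [cntOcc]
  | succ n ih =>
    intro l acc hl
    cases l with
    | nil => rw [PySem.Chars.count.go.eq_def]; simp [cntOcc]
    | cons h t =>
      cases sub with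
      | nil => exact absurd rfl hs
      | cons s0 ss =>
        rw [go_succ_cons]
        simp only [List.length_cons] at hl
        by_cases hp : (s0 :: ss).isPrefixOf (h :: t) = true
        · rw [if_pos hp]
          have hd : List.drop (s0 :: ss).length (h :: t) = t.drop ((s0 :: ss).length - 1) := by
            simp [List.length_cons]
          have hlen : (List.drop (s0 :: ss).length (h :: t)).length ≤ n := by
            simp only [List.length_drop, List.length_cons]
            omega
          rw [ih _ _ hlen, hd]
          conv_rhs => rw [cntOcc]
          rw [if_pos hp]
          omega
        · rw [if_neg hp]
          rw [ih _ _ (by omega)]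
          conv_rhs => rw [cntOcc]
          rw [if_neg hp]

theorem count_eq_cntOcc (s sub : List Char) (hs : sub ≠ []) :
    PySem.Chars.count s sub = cntOcc sub s := by
  unfold PySem.Chars.count
  rw [if_neg (by simpa [List.isEmpty_iff] using hs)]
  rw [go_eq_cntOcc sub hs s.length s 0 le_rfl]
  omega

theorem not_prefix_space (sub : List Char) (h1 : sub ≠ []) (h2 : ' ' ∉ sub) (b : List Char) :
    sub.isPrefixOf (' ' :: b) = false := by
  cases sub with
  | nil => exact absurd rfl h1
  | cons s0 ss =>
    by_contra hx
    have hp : (s0 :: ss).isPrefixOf (' ' :: b) = true := by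
      cases hy : (s0 :: ss).isPrefixOf (' ' :: b) with
      | true => rfl
      | false => exact absurd hy hx
    rw [List.isPrefixOf_iff_prefix, List.cons_prefix_cons] at hp
    exact h2 (hp.1 ▸ List.mem_cons_self)

theorem cntOcc_append (sub : List Char) (h1 : sub ≠ []) (h2 : ' ' ∉ sub) :
    ∀ (n : Nat) (a b : List Char), a.length ≤ n →
      cntOcc sub (a ++ ' ' :: b) = cntOcc sub a + cntOcc sub b := by
  intro n
  induction n with
  | zero =>
    intro a b ha
    have hnil : a = [] := List.eq_nil_of_length_eq_zero (Nat.le_zero.mp ha)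
    subst hnil
    rw [List.nil_append]
    conv_lhs => rw [cntOcc]
    rw [if_neg (by simp [not_prefix_space sub h1 h2 b])]
    simp [cntOcc]
  | succ n ih =>
    intro a b ha
    cases a with
    | nil =>
      rw [List.nil_append]
      conv_lhs => rw [cntOcc]
      rw [if_neg (by simp [not_prefix_space sub h1 h2 b])]
      simp [cntOcc]
    | cons hda tla =>
      simp only [List.length_cons] at ha
      by_cases hp : sub.isPrefixOf ((hda :: tla) ++ ' ' :: b) = true
      · -- the occurrence lies inside a: sub.length ≤ a.length
        have hpre : sub <+: (hda :: tla) ++ ' ' :: b := List.isPrefixOf_iff_prefix.mp hp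
        have hle : sub.length ≤ (hda :: tla).length := by
          by_contra hgt
          push Not at hgt
          have hi : (hda :: tla).length < sub.length := hgt
          have hget := hpre.getElem (i := (hda :: tla).length) hi
          rw [List.getElem_append_right (le_refl _)] at hget
          simp only [Nat.sub_self, List.getElem_cons_zero] at hget
          exact h2 (hget ▸ List.getElem_mem hi)
        have hpa : sub <+: (hda :: tla) := by
          have heq : sub = List.take sub.length (hda :: tla) :=
            (List.prefix_iff_eq_take.mp hpre).trans (List.take_append_of_le_length hle)
          have htp := List.take_prefix sub.length (hda :: tla)
          rw [← heq] at htp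
          exact htp
        have hpa' : sub.isPrefixOf (hda :: tla) = true := List.isPrefixOf_iff_prefix.mpr hpa
        -- unfold both sides
        obtain ⟨s0, ss⟩ : ∃ s0 ss, sub = s0 :: ss := by
          cases sub with
          | nil => exact absurd rfl h1
          | cons s0 ss => exact ⟨s0, ss, rfl⟩
        obtain ⟨ss, rfl⟩ := ss
        have hk : (s0 :: ss).length - 1 = ss.length := by simp
        have hklen : ss.length ≤ tla.length := by
          simp only [List.length_cons] at hle; omega
        conv_lhs => rw [List.cons_append, cntOcc]
        rw [if_pos (by rw [← List.cons_append]; exact hp), hk]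
        rw [List.drop_append_of_le_length hklen]
        rw [ih (tla.drop ss.length) b (by simp only [List.length_drop]; omega)]
        conv_rhs => rw [cntOcc]
        rw [if_pos hpa', hk]
        omega
      · have hpa : sub.isPrefixOf (hda :: tla) = false := by
          cases hy : sub.isPrefixOf (hda :: tla) with
          | false => rfl
          | true =>
            have hpp : sub <+: (hda :: tla) ++ ' ' :: b :=
              (List.isPrefixOf_iff_prefix.mp hy).trans (List.prefix_append _ _)
            exact absurd (List.isPrefixOf_iff_prefix.mpr hpp) hp
        conv_lhs => rw [List.cons_append, cntOcc]
        rw [if_neg (by rw [← List.cons_append]; exact hp)]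
        rw [ih tla b (by omega)]
        conv_rhs => rw [cntOcc]
        rw [if_neg (by simp [hpa])]

theorem lower_space_cons (a J : List Char) :
    PySem.Chars.lower (a ++ ' ' :: J) = PySem.Chars.lower a ++ ' ' :: PySem.Chars.lower J := by
  have hsp : PySem.Chars.lowerChar ' ' = ' ' := by decide
  simp [PySem.Chars.lower, hsp]

theorem chars_count_lower_join (sub : List Char) (h1 : sub ≠ []) (h2 : ' ' ∉ sub) :
    ∀ ts : List (List Char),
      PySem.Chars.count (PySem.Chars.lower (PySem.Chars.join [' '] ts)) sub
        = (ts.map (fun t => PySem.Chars.count (PySem.Chars.lower t) sub)).sum := by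
  intro ts
  induction ts with
  | nil =>
    rw [count_eq_cntOcc _ _ h1]
    simp [PySem.Chars.join, List.intercalate, PySem.Chars.lower, cntOcc]
  | cons t rest ih =>
    cases rest with
    | nil =>
      have hj : PySem.Chars.join [' '] [t] = t := by simp [PySem.Chars.join, List.intercalate]
      rw [hj]
      simp
    | cons t2 r2 =>
      have hj : PySem.Chars.join [' '] (t :: t2 :: r2)
          = t ++ ' ' :: PySem.Chars.join [' '] (t2 :: r2) := by
        simp [PySem.Chars.join, List.intercalate, List.intersperse]
      rw [hj, lower_space_cons, count_eq_cntOcc _ _ h1,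
          cntOcc_append sub h1 h2 (PySem.Chars.lower t).length _ _ le_rfl,
          ← count_eq_cntOcc _ _ h1, ← count_eq_cntOcc _ _ h1, ih]
      simp

theorem count_all_one (items : List (List (String × String))) (kw : String)
    (h1 : kw.toList ≠ []) (h2 : ' ' ∉ kw.toList) :
    PySem.Str.count (allTextOf items) kw
      = (items.map (fun it => PySem.Str.count (lowText it) kw)).sum := by
  have hlist : (allTextOf items).toList
      = PySem.Chars.lower (PySem.Chars.join [' '] (items.map (fun it => (textOf it).toList))) := by
    simp [allTextOf, PySem.Str.toList_lower, PySem.Str.toList_join, List.map_map]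
    rfl
  show PySem.Chars.count (allTextOf items).toList kw.toList = _
  rw [hlist, chars_count_lower_join kw.toList h1 h2, List.map_map]
  refine congrArg List.sum (List.map_congr_left ?_)
  intro it _
  show PySem.Chars.count (PySem.Chars.lower (textOf it).toList) kw.toList
      = PySem.Chars.count (lowText it).toList kw.toList
  rw [lowText, PySem.Str.toList_lower]

theorem kwCount_all (items : List (List (String × String))) (kws : List String)
    (hwf : ∀ kw ∈ kws, kw.toList ≠ [] ∧ ' ' ∉ kw.toList) :
    kwCount (allTextOf items) kws = Ttot items kws := by
  induction kws with
  | nil => simp [kwCount, Ttot]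
  | cons kw kws ih =>
    have hk := hwf kw List.mem_cons_self
    have ih' := ih (fun k hk => hwf k (List.mem_cons_of_mem _ hk))
    have hone : (PySem.Str.count (allTextOf items) kw : Int)
        = (items.map (fun it => (PySem.Str.count (lowText it) kw : Int))).sum := by
      rw [count_all_one items kw hk.1 hk.2, Nat.cast_list_sum, List.map_map]
      rfl
    have hsplit : Ttot items (kw :: kws)
        = (items.map (fun it => (PySem.Str.count (lowText it) kw : Int))).sum + Ttot items kws := by
      unfold Ttot
      rw [← PySem.List.sum_map_add_int]
      refine congrArg List.sum (List.map_congr_left ?_)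
      intro it _
      simp [kwCount]
    rw [hsplit, ← ih', ← hone]
    simp [kwCount]

-- ---------- A-side: canonical form of the interests/citations fold ----------

theorem string_append_cancel (s a b : String) (h : s ++ a = s ++ b) : a = b := by
  have h2 := congrArg String.toList h
  simp [String.toList_append] at h2
  exact String.ext h2

theorem innerA_eq (k : String) (kws : List String) (items : List (List (String × String))) :
    ∀ (cits : PySem.Dict String (List (List (String × String)))),
    items.foldl (fun cits item =>
        let text := PySem.Str.lower (textOf item)
        match firstKw kws text with
        | some kw => cits.modify k [] (fun l => l ++ [mkCit text (pvGetD item "url") kw])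
        | none => cits) cits
    = if items.filterMap (citOf kws) = [] then cits
      else cits.insert k (cits.getD k [] ++ items.filterMap (citOf kws)) := by
  induction items with
  | nil => intro cits; simp
  | cons it rest ih =>
    intro cits
    simp only [List.foldl_cons, List.filterMap_cons]
    cases h : firstKw kws (lowText it) with
    | none =>
      have hc : citOf kws it = none := by simp [citOf, h]
      rw [hc]
      simp only [lowText] at h
      simp only [h]
      exact ih cits
    | some kw =>
      have hc : citOf kws it = some (mkCit (lowText it) (pvGetD it "url") kw) := by simp [citOf, h]
      rw [hc, ih]
      simp only [lowText] at h
      by_cases hr : rest.filterMap (citOf kws) = []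
      · simp [hr, h, lowText, PySem.Dict.modify]
      · simp only [hr, if_false, h, lowText, PySem.Dict.modify]
        simp [PySem.Dict.getD_insert_self, PySem.Dict.insert_insert_self]

theorem foldA_eq (items : List (List (String × String))) (all_text : String) :
    ∀ (cats : List (String × List String)), (cats.map Prod.fst).Nodup →
    ∀ (st : PySem.Dict String Int × PySem.Dict String (List (List (String × String)))),
    (∀ ck ∈ cats, st.2.contains ("interest_" ++ ck.1) = false) →
    cats.foldl (fun st ck =>
        let count := kwCount all_text ck.2
        if count > 0 then
          let ints := st.1.insert ck.1 count
          let cits := items.foldl (fun cits item =>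
              let text := PySem.Str.lower (textOf item)
              match firstKw ck.2 text with
              | some kw => cits.modify ("interest_" ++ ck.1) [] (fun l => l ++ [mkCit text (pvGetD item "url") kw])
              | none => cits) st.2
          (ints, cits)
        else st) st
    = (cats.foldl (fun d ck => if kwCount all_text ck.2 > 0 then d.insert ck.1 (kwCount all_text ck.2) else d) st.1,
       cats.foldl (fun d ck => if kwCount all_text ck.2 > 0 then
            (if Ltot ck.2 items = [] then d else d.insert ("interest_" ++ ck.1) (Ltot ck.2 items)) else d) st.2) := by
  intro cats
  induction cats with
  | nil => intro _ st _; simp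
  | cons ck rest ih =>
    intro hN st hfresh
    have hN' : (rest.map Prod.fst).Nodup := by simpa using hN.of_cons
    have hhead : ck.1 ∉ rest.map Prod.fst := by
      rw [List.map_cons, List.nodup_cons] at hN; exact hN.1
    simp only [List.foldl_cons]
    by_cases hc : kwCount all_text ck.2 > 0
    · dsimp only
      rw [if_pos hc, if_pos hc, if_pos hc]
      rw [innerA_eq ("interest_" ++ ck.1) ck.2 items st.2]
      rw [PySem.Dict.getD_of_not_contains st.2 [] (hfresh ck List.mem_cons_self), List.nil_append]
      have hL : items.filterMap (citOf ck.2) = Ltot ck.2 items := rfl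
      rw [hL]
      exact ih hN' _ (fun c hcm => by
        show (if Ltot ck.2 items = [] then st.2 else st.2.insert ("interest_" ++ ck.1) (Ltot ck.2 items)).contains ("interest_" ++ c.1) = false
        split
        · exact hfresh c (List.mem_cons_of_mem ck hcm)
        · rw [PySem.Dict.contains_insert]
          have hne : ("interest_" ++ c.1 == "interest_" ++ ck.1) = false := by
            rw [beq_eq_false_iff_ne]
            intro heq
            have hcc := string_append_cancel _ _ _ heq
            exact hhead (hcc ▸ List.mem_map_of_mem hcm)
          rw [hne, Bool.false_or]
          exact hfresh c (List.mem_cons_of_mem ck hcm))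
    · dsimp only
      rw [if_neg hc, if_neg hc, if_neg hc]
      exact ih hN' st (fun c hcm => hfresh c (List.mem_cons_of_mem ck hcm))

-- ---------- B-side: the nested item-major fold, component by component ----------

-- totals: per-item inner fold
theorem tot_inner_getD_notmem (txt : String) :
    ∀ (cats : List (String × List String)) (d : PySem.Dict String Int) (c : String),
      c ∉ cats.map Prod.fst →
      (cats.foldl (fun d ck => d.modify ck.1 0 (fun n => n + kwCount txt ck.2)) d).getD c 0 = d.getD c 0 := by
  intro cats
  induction cats with
  | nil => intro d c _; rfl
  | cons ck rest ih =>
    intro d c h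
    simp only [List.map_cons, List.mem_cons, not_or] at h
    simp only [List.foldl_cons]
    rw [ih _ _ h.2, PySem.Dict.getD_modify, if_neg h.1]

theorem tot_inner_getD (txt : String) :
    ∀ (cats : List (String × List String)), (cats.map Prod.fst).Nodup →
    ∀ (c : String) (kws : List String), (c, kws) ∈ cats →
    ∀ (d : PySem.Dict String Int),
      (cats.foldl (fun d ck => d.modify ck.1 0 (fun n => n + kwCount txt ck.2)) d).getD c 0
        = d.getD c 0 + kwCount txt kws := by
  intro cats
  induction cats with
  | nil => intro _ c kws hm; cases hm
  | cons ck rest ih =>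
    intro hN c kws hm d
    have hN' : (rest.map Prod.fst).Nodup := by simpa using hN.of_cons
    have hhead : ck.1 ∉ rest.map Prod.fst := by
      rw [List.map_cons, List.nodup_cons] at hN; exact hN.1
    simp only [List.foldl_cons]
    rcases List.mem_cons.mp hm with heq | hmem
    · have hc : c = ck.1 := by rw [← heq]
      have hk : kws = ck.2 := by rw [← heq]
      subst hc hk
      rw [tot_inner_getD_notmem txt rest _ ck.1 hhead, PySem.Dict.getD_modify, if_pos rfl]
    · have hne : c ≠ ck.1 := fun hcc => hhead (hcc ▸ List.mem_map_of_mem hmem)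
      rw [ih hN' c kws hmem, PySem.Dict.getD_modify, if_neg hne]

theorem tot_outer_getD (cats : List (String × List String)) (hnd : (cats.map Prod.fst).Nodup)
    (c : String) (kws : List String) (hm : (c, kws) ∈ cats) :
    ∀ (items : List (List (String × String))) (d : PySem.Dict String Int),
      (items.foldl (fun d item =>
          cats.foldl (fun d ck => d.modify ck.1 0 (fun n => n + kwCount (PySem.Str.lower (textOf item)) ck.2)) d) d).getD c 0
        = d.getD c 0 + Ttot items kws := by
  intro items
  induction items with
  | nil => intro d; simp [Ttot]
  | cons it rest ih =>
    intro d
    simp only [List.foldl_cons]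
    rw [ih, tot_inner_getD (PySem.Str.lower (textOf it)) cats hnd c kws hm d]
    have hT : Ttot (it :: rest) kws = kwCount (PySem.Str.lower (textOf it)) kws + Ttot rest kws := by
      simp [Ttot, lowText]
    rw [hT]
    ring

theorem tot_inner_keys (txt : String) :
    ∀ (cats : List (String × List String)) (d : PySem.Dict String Int),
      (∀ ck ∈ cats, ck.1 ∈ d.keys) →
      (cats.foldl (fun d ck => d.modify ck.1 0 (fun n => n + kwCount txt ck.2)) d).keys = d.keys := by
  intro cats
  induction cats with
  | nil => intro d _; rfl
  | cons ck rest ih =>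
    intro d h
    simp only [List.foldl_cons]
    have hk : (d.modify ck.1 0 (fun n => n + kwCount txt ck.2)).keys = d.keys := by
      rw [PySem.Dict.keys_modify, PySem.Dict.keys_insert_of_contains _ _
        (PySem.Dict.contains_iff_mem_keys _ _ |>.mpr (h ck List.mem_cons_self))]
    rw [ih _ (fun c hc => by rw [hk]; exact h c (List.mem_cons_of_mem ck hc)), hk]

theorem tot_outer_keys (cats : List (String × List String)) :
    ∀ (items : List (List (String × String))) (d : PySem.Dict String Int),
      (∀ ck ∈ cats, ck.1 ∈ d.keys) →
      ((items.foldl (fun d item =>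
          cats.foldl (fun d ck => d.modify ck.1 0 (fun n => n + kwCount (PySem.Str.lower (textOf item)) ck.2)) d) d).keys
        = d.keys) := by
  intro items
  induction items with
  | nil => intro d _; rfl
  | cons it rest ih =>
    intro d h
    simp only [List.foldl_cons]
    have hk := tot_inner_keys (PySem.Str.lower (textOf it)) cats d h
    rw [ih _ (fun c hc => by rw [hk]; exact h c hc), hk]

-- hits: per-item inner fold (with the break/match)
theorem hit_inner_keys (item : List (String × String)) :
    ∀ (cats : List (String × List String)) (d : PySem.Dict String (List (List (String × String)))),
      (∀ ck ∈ cats, ck.1 ∈ d.keys) →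
      (cats.foldl (fun p ck =>
          match firstKw ck.2 (PySem.Str.lower (textOf item)) with
          | some kw => p.modify ck.1 [] (fun l => l ++ [mkCit (PySem.Str.lower (textOf item)) (pvGetD item "url") kw])
          | none => p) d).keys = d.keys := by
  intro cats
  induction cats with
  | nil => intro d _; rfl
  | cons ck rest ih =>
    intro d h
    simp only [List.foldl_cons]
    cases hfk : firstKw ck.2 (PySem.Str.lower (textOf item)) with
    | none =>
      simp only [hfk]
      exact ih _ (fun c hc => h c (List.mem_cons_of_mem ck hc))
    | some kw =>
      simp only [hfk]
      have hk : (d.modify ck.1 [] (fun l => l ++ [mkCit (PySem.Str.lower (textOf item)) (pvGetD item "url") kw])).keys = d.keys := by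
        rw [PySem.Dict.keys_modify, PySem.Dict.keys_insert_of_contains _ _
          (PySem.Dict.contains_iff_mem_keys _ _ |>.mpr (h ck List.mem_cons_self))]
      rw [ih _ (fun c hc => by rw [hk]; exact h c (List.mem_cons_of_mem ck hc)), hk]

theorem hit_inner_getD_notmem (item : List (String × String)) :
    ∀ (cats : List (String × List String)) (d : PySem.Dict String (List (List (String × String)))) (c : String),
      c ∉ cats.map Prod.fst →
      (cats.foldl (fun p ck =>
          match firstKw ck.2 (PySem.Str.lower (textOf item)) with
          | some kw => p.modify ck.1 [] (fun l => l ++ [mkCit (PySem.Str.lower (textOf item)) (pvGetD item "url") kw])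
          | none => p) d).getD c [] = d.getD c [] := by
  intro cats
  induction cats with
  | nil => intro d c _; rfl
  | cons ck rest ih =>
    intro d c h
    simp only [List.map_cons, List.mem_cons, not_or] at h
    simp only [List.foldl_cons]
    cases hfk : firstKw ck.2 (PySem.Str.lower (textOf item)) with
    | none =>
      simp only [hfk]
      exact ih _ _ h.2
    | some kw =>
      simp only [hfk]
      rw [ih _ _ h.2, PySem.Dict.getD_modify, if_neg h.1]

theorem hit_inner_getD (item : List (String × String)) :
    ∀ (cats : List (String × List String)), (cats.map Prod.fst).Nodup →
    ∀ (c : String) (kws : List String), (c, kws) ∈ cats →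
    ∀ (d : PySem.Dict String (List (List (String × String)))),
      (cats.foldl (fun p ck =>
          match firstKw ck.2 (PySem.Str.lower (textOf item)) with
          | some kw => p.modify ck.1 [] (fun l => l ++ [mkCit (PySem.Str.lower (textOf item)) (pvGetD item "url") kw])
          | none => p) d).getD c []
        = d.getD c [] ++ (citOf kws item).toList := by
  intro cats
  induction cats with
  | nil => intro _ c kws hm; cases hm
  | cons ck rest ih =>
    intro hN c kws hm d
    have hN' : (rest.map Prod.fst).Nodup := by simpa using hN.of_cons
    have hhead : ck.1 ∉ rest.map Prod.fst := by
      rw [List.map_cons, List.nodup_cons] at hN; exact hN.1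
    simp only [List.foldl_cons]
    rcases List.mem_cons.mp hm with heq | hmem
    · have hc : c = ck.1 := by rw [← heq]
      have hk : kws = ck.2 := by rw [← heq]
      subst hc hk
      cases hfk : firstKw ck.2 (PySem.Str.lower (textOf item)) with
      | none =>
        simp only [hfk]
        rw [hit_inner_getD_notmem item rest _ ck.1 hhead]
        have hco : citOf ck.2 item = none := by simp [citOf, lowText, hfk]
        rw [hco]
        simp
      | some kw =>
        simp only [hfk]
        rw [hit_inner_getD_notmem item rest _ ck.1 hhead, PySem.Dict.getD_modify, if_pos rfl]
        have hco : citOf ck.2 item = some (mkCit (PySem.Str.lower (textOf item)) (pvGetD item "url") kw) := by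
          simp [citOf, lowText, hfk]
        rw [hco]
        rfl
    · have hne : c ≠ ck.1 := fun hcc => hhead (hcc ▸ List.mem_map_of_mem hmem)
      cases hfk : firstKw ck.2 (PySem.Str.lower (textOf item)) with
      | none =>
        simp only [hfk]
        exact ih hN' c kws hmem d
      | some kw =>
        simp only [hfk]
        rw [ih hN' c kws hmem, PySem.Dict.getD_modify, if_neg hne]

theorem hit_outer (cats : List (String × List String)) (hnd : (cats.map Prod.fst).Nodup) :
    ∀ (items : List (List (String × String))) (d : PySem.Dict String (List (List (String × String)))),
      (∀ ck ∈ cats, ck.1 ∈ d.keys) →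
      ((items.foldl (fun d item =>
          cats.foldl (fun p ck =>
            match firstKw ck.2 (PySem.Str.lower (textOf item)) with
            | some kw => p.modify ck.1 [] (fun l => l ++ [mkCit (PySem.Str.lower (textOf item)) (pvGetD item "url") kw])
            | none => p) d) d).keys = d.keys
       ∧ ∀ (c : String) (kws : List String), (c, kws) ∈ cats →
          (items.foldl (fun d item =>
            cats.foldl (fun p ck =>
              match firstKw ck.2 (PySem.Str.lower (textOf item)) with
              | some kw => p.modify ck.1 [] (fun l => l ++ [mkCit (PySem.Str.lower (textOf item)) (pvGetD item "url") kw])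
              | none => p) d) d).getD c [] = d.getD c [] ++ Ltot kws items) := by
  intro items
  induction items with
  | nil => intro d _; exact ⟨rfl, fun c kws _ => by simp [Ltot]⟩
  | cons it rest ih =>
    intro d h
    simp only [List.foldl_cons]
    have hk := hit_inner_keys it cats d h
    obtain ⟨ihk, ihg⟩ := ih _ (fun c hc => by rw [hk]; exact h c hc)
    refine ⟨by rw [ihk, hk], fun c kws hm => ?_⟩
    rw [ihg c kws hm, hit_inner_getD it cats hnd c kws hm d]
    have hL : Ltot kws (it :: rest) = (citOf kws it).toList ++ Ltot kws rest := by
      cases hco : citOf kws it <;> simp [Ltot, List.filterMap_cons, hco]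
    rw [hL, List.append_assoc]

-- keys of the conditional-insert fold (dict comprehension with a filter)
theorem keys_condinsert (P : (String × List String) → Bool) (v : (String × List String) → Int) :
    ∀ (cats : List (String × List String)), (cats.map Prod.fst).Nodup →
    ∀ (d : PySem.Dict String Int), (∀ ck ∈ cats, d.contains ck.1 = false) →
      (cats.foldl (fun d ck => if P ck then d.insert ck.1 (v ck) else d) d).keys
        = d.keys ++ (cats.filter P).map Prod.fst := by
  intro cats
  induction cats with
  | nil => intro _ d _; simp
  | cons ck rest ih =>
    intro hN d hfresh
    have hN' : (rest.map Prod.fst).Nodup := by simpa using hN.of_cons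
    have hhead : ck.1 ∉ rest.map Prod.fst := by
      rw [List.map_cons, List.nodup_cons] at hN; exact hN.1
    simp only [List.foldl_cons, List.filter_cons]
    by_cases hp : P ck = true
    · rw [if_pos hp, if_pos hp]
      have hfr : ∀ c ∈ rest, (d.insert ck.1 (v ck)).contains c.1 = false := by
        intro c hc
        rw [PySem.Dict.contains_insert]
        have hne : (c.1 == ck.1) = false := by
          rw [beq_eq_false_iff_ne]
          intro hcc
          exact hhead (hcc ▸ List.mem_map_of_mem hc)
        rw [hne, Bool.false_or]
        exact hfresh c (List.mem_cons_of_mem ck hc)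
      rw [ih hN' _ hfr, PySem.Dict.keys_insert_of_not_contains _ _ (hfresh ck List.mem_cons_self)]
      simp
    · rw [if_neg hp, if_neg hp]
      exact ih hN' d (fun c hc => hfresh c (List.mem_cons_of_mem ck hc))

-- Prop-condition variant of keys_condinsert (the ports test 'p.2 > 0' as a Prop)
theorem keys_condinsert' (P : (String × List String) → Prop) [DecidablePred P]
    (v : (String × List String) → Int)
    (cats : List (String × List String)) (hN : (cats.map Prod.fst).Nodup)
    (d : PySem.Dict String Int) (hfresh : ∀ ck ∈ cats, d.contains ck.1 = false) :
    (cats.foldl (fun d ck => if P ck then d.insert ck.1 (v ck) else d) d).keys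
      = d.keys ++ (cats.filter (fun ck => decide (P ck))).map Prod.fst := by
  have hstep := PySem.List.foldl_congr_mem cats
    (fun d ck => if P ck then d.insert ck.1 (v ck) else d)
    (fun d ck => if (fun ck => decide (P ck)) ck then d.insert ck.1 (v ck) else d) d
    (fun acc x _ => by simp only [decide_eq_true_eq])
  rw [hstep, keys_condinsert (fun ck => decide (P ck)) v cats hN d hfresh]

-- final items of the per-item totals fold, from the zero-initialised dict
theorem Tcats_items (cats : List (String × List String)) (hnd : (cats.map Prod.fst).Nodup)
    (items : List (List (String × String))) :
    (items.foldl (fun d item =>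
        cats.foldl (fun d ck => d.modify ck.1 0 (fun n => n + kwCount (PySem.Str.lower (textOf item)) ck.2)) d)
      (cats.foldl (fun d ck => d.insert ck.1 (0 : Int)) PySem.Dict.empty)).items
      = cats.map (fun ck => (ck.1, Ttot items ck.2)) := by
  have hi0 : (cats.foldl (fun d ck => d.insert ck.1 (0 : Int)) PySem.Dict.empty).items
      = cats.map (fun a => (a.1, (0 : Int))) := by
    rw [PySem.Dict.items_foldl_insert_fresh cats (fun a => a.1) (fun _ => (0 : Int)) PySem.Dict.empty
      (fun a _ => by simp [PySem.Dict.contains_empty]) hnd]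
    simp [show (PySem.Dict.empty : PySem.Dict String Int).items = [] from rfl]
  have hkeys0 : (cats.foldl (fun d ck => d.insert ck.1 (0 : Int)) PySem.Dict.empty).keys
      = cats.map Prod.fst := by
    simp only [PySem.Dict.keys, hi0, List.map_map]
    rfl
  have hmem0 : ∀ ck ∈ cats, ck.1 ∈ (cats.foldl (fun d ck => d.insert ck.1 (0 : Int)) PySem.Dict.empty).keys :=
    fun ck h => by rw [hkeys0]; exact List.mem_map_of_mem h
  have hkeysF : (items.foldl (fun d item =>
        cats.foldl (fun d ck => d.modify ck.1 0 (fun n => n + kwCount (PySem.Str.lower (textOf item)) ck.2)) d)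
      (cats.foldl (fun d ck => d.insert ck.1 (0 : Int)) PySem.Dict.empty)).keys = cats.map Prod.fst := by
    rw [tot_outer_keys cats items _ hmem0, hkeys0]
  rw [PySem.Dict.items_eq_map_keys _ (by rw [hkeysF]; exact hnd) 0, hkeysF, List.map_map]
  apply List.map_congr_left
  intro ck hm
  show (ck.1, _) = (ck.1, Ttot items ck.2)
  have hg := tot_outer_getD cats hnd ck.1 ck.2 (Prod.mk.eta ▸ hm) items
    (cats.foldl (fun d ck => d.insert ck.1 (0 : Int)) PySem.Dict.empty)
  have h0 : (cats.foldl (fun d ck => d.insert ck.1 (0 : Int)) PySem.Dict.empty).getD ck.1 0 = 0 :=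
    PySem.Dict.getD_of_mem_items _ (hi0 ▸ List.mem_map_of_mem hm) (hkeys0 ▸ hnd) 0
  rw [hg, h0, zero_add]

-- final hit lists of the per-item hits fold, from the []-initialised dict
theorem TH_getD (items : List (List (String × String))) :
    ∀ ck ∈ interestKeywords,
    (items.foldl (fun d item =>
        interestKeywords.foldl (fun p ck =>
          match firstKw ck.2 (PySem.Str.lower (textOf item)) with
          | some kw => p.modify ck.1 [] (fun l => l ++ [mkCit (PySem.Str.lower (textOf item)) (pvGetD item "url") kw])
          | none => p) d)
      (interestKeywords.foldl (fun d ck => d.insert ck.1 ([] : List (List (String × String)))) PySem.Dict.empty)).getD ck.1 []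
      = Ltot ck.2 items := by
  intro ck hm
  have hnd : (interestKeywords.map Prod.fst).Nodup := by decide
  have hi0 : (interestKeywords.foldl (fun d ck => d.insert ck.1 ([] : List (List (String × String)))) PySem.Dict.empty).items
      = interestKeywords.map (fun a => (a.1, ([] : List (List (String × String))))) := by
    rw [PySem.Dict.items_foldl_insert_fresh interestKeywords (fun a => a.1)
      (fun _ => ([] : List (List (String × String)))) PySem.Dict.empty
      (fun a _ => by simp [PySem.Dict.contains_empty]) hnd]
    simp [show (PySem.Dict.empty : PySem.Dict String (List (List (String × String)))).items = [] from rfl]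
  have hkeys0 : (interestKeywords.foldl (fun d ck => d.insert ck.1 ([] : List (List (String × String)))) PySem.Dict.empty).keys
      = interestKeywords.map Prod.fst := by
    simp only [PySem.Dict.keys, hi0, List.map_map]
    rfl
  have hmem0 : ∀ c ∈ interestKeywords, c.1 ∈ (interestKeywords.foldl (fun d ck => d.insert ck.1 ([] : List (List (String × String)))) PySem.Dict.empty).keys :=
    fun c h => by rw [hkeys0]; exact List.mem_map_of_mem h
  have hout := (hit_outer interestKeywords hnd items _ hmem0).2 ck.1 ck.2 (Prod.mk.eta ▸ hm)
  have h0 : (interestKeywords.foldl (fun d ck => d.insert ck.1 ([] : List (List (String × String)))) PySem.Dict.empty).getD ck.1 [] = [] :=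
    PySem.Dict.getD_of_mem_items _ (hi0 ▸ List.mem_map_of_mem hm) (hkeys0 ▸ hnd) []
  rw [hout, h0, List.nil_append]

-- the triple item-major fold of B is three independent folds
theorem Bsplit (items : List (List (String × String)))
    (i0 p0 : PySem.Dict String Int) (h0 : PySem.Dict String (List (List (String × String)))) :
    items.foldl (fun (st : PySem.Dict String Int × PySem.Dict String Int × PySem.Dict String (List (List (String × String)))) item =>
      let text := PySem.Str.lower (textOf item)
      let snippet := if PySem.Str.len text > 200 then PySem.Str.slice text none (some 200) ++ "..." else text
      let ih := interestKeywords.foldl (fun (p : PySem.Dict String Int × PySem.Dict String (List (List (String × String)))) ck =>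
          (p.1.modify ck.1 0 (fun n => n + kwCount text ck.2),
           match firstKw ck.2 text with
           | some kw => p.2.modify ck.1 [] (fun l => l ++ [[("text", snippet), ("url", pvGetD item "url"), ("keyword", kw)]])
           | none => p.2)) (st.1, st.2.2)
      let pt := personalityIndicators.foldl (fun (d : PySem.Dict String Int) ti => d.modify ti.1 0 (fun n => n + kwCount text ti.2)) st.2.1
      (ih.1, pt, ih.2)) (i0, p0, h0)
    = (items.foldl (fun d item =>
          interestKeywords.foldl (fun d ck => d.modify ck.1 0 (fun n => n + kwCount (PySem.Str.lower (textOf item)) ck.2)) d) i0,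
       items.foldl (fun d item =>
          personalityIndicators.foldl (fun d ti => d.modify ti.1 0 (fun n => n + kwCount (PySem.Str.lower (textOf item)) ti.2)) d) p0,
       items.foldl (fun d item =>
          interestKeywords.foldl (fun p ck =>
            match firstKw ck.2 (PySem.Str.lower (textOf item)) with
            | some kw => p.modify ck.1 [] (fun l => l ++ [mkCit (PySem.Str.lower (textOf item)) (pvGetD item "url") kw])
            | none => p) d) h0) := by
  rw [PySem.List.foldl_congr_mem items _
    (fun (st : PySem.Dict String Int × PySem.Dict String Int × PySem.Dict String (List (List (String × String)))) item =>
      (interestKeywords.foldl (fun d ck => d.modify ck.1 0 (fun n => n + kwCount (PySem.Str.lower (textOf item)) ck.2)) st.1,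
       personalityIndicators.foldl (fun d ti => d.modify ti.1 0 (fun n => n + kwCount (PySem.Str.lower (textOf item)) ti.2)) st.2.1,
       interestKeywords.foldl (fun p ck =>
          match firstKw ck.2 (PySem.Str.lower (textOf item)) with
          | some kw => p.modify ck.1 [] (fun l => l ++ [mkCit (PySem.Str.lower (textOf item)) (pvGetD item "url") kw])
          | none => p) st.2.2)) (i0, p0, h0) ?_]
  · rw [PySem.List.foldl_prod_mk
      (f := fun (d : PySem.Dict String Int) (item : List (String × String)) => interestKeywords.foldl (fun d ck => d.modify ck.1 0 (fun n => n + kwCount (PySem.Str.lower (textOf item)) ck.2)) d)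
      (g := fun (p : PySem.Dict String Int × PySem.Dict String (List (List (String × String)))) (item : List (String × String)) =>
        (personalityIndicators.foldl (fun d ti => d.modify ti.1 0 (fun n => n + kwCount (PySem.Str.lower (textOf item)) ti.2)) p.1,
         interestKeywords.foldl (fun q ck =>
            match firstKw ck.2 (PySem.Str.lower (textOf item)) with
            | some kw => q.modify ck.1 [] (fun l => l ++ [mkCit (PySem.Str.lower (textOf item)) (pvGetD item "url") kw])
            | none => q) p.2))]
    rw [PySem.List.foldl_prod_mk
      (f := fun (d : PySem.Dict String Int) (item : List (String × String)) => personalityIndicators.foldl (fun d ti => d.modify ti.1 0 (fun n => n + kwCount (PySem.Str.lower (textOf item)) ti.2)) d)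
      (g := fun (d : PySem.Dict String (List (List (String × String)))) (item : List (String × String)) => interestKeywords.foldl (fun q ck =>
            match firstKw ck.2 (PySem.Str.lower (textOf item)) with
            | some kw => q.modify ck.1 [] (fun l => l ++ [mkCit (PySem.Str.lower (textOf item)) (pvGetD item "url") kw])
            | none => q) d)]
  · intro acc x _
    dsimp only
    rw [PySem.List.foldl_prod_mk
      (f := fun (d : PySem.Dict String Int) (ck : String × List String) => PySem.Dict.modify d ck.1 0 (fun n => n + kwCount (PySem.Str.lower (textOf x)) ck.2))
      (g := fun (q : PySem.Dict String (List (List (String × String)))) (ck : String × List String) =>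
        match firstKw ck.2 (PySem.Str.lower (textOf x)) with
        | some kw => q.modify ck.1 [] (fun l => l ++
            [[("text", if PySem.Str.len (PySem.Str.lower (textOf x)) > 200
                then PySem.Str.slice (PySem.Str.lower (textOf x)) none (some 200) ++ "..."
                else PySem.Str.lower (textOf x)), ("url", pvGetD x "url"), ("keyword", kw)]])
        | none => q)]
    simp only [mkCit]

-- the citations component: A's conditional per-category fold = B's keys-driven fold
theorem cit_component (items : List (List (String × String)))
    (hcnt : ∀ ck ∈ interestKeywords, kwCount (allTextOf items) ck.2 = Ttot items ck.2) :
    (interestKeywords.foldl (fun d ck => if kwCount (allTextOf items) ck.2 > 0 then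
        (if Ltot ck.2 items = [] then d else d.insert ("interest_" ++ ck.1) (Ltot ck.2 items)) else d)
      PySem.Dict.empty).items
    = ((((items.foldl (fun d item =>
            interestKeywords.foldl (fun d ck => d.modify ck.1 0 (fun n => n + kwCount (PySem.Str.lower (textOf item)) ck.2)) d)
          (interestKeywords.foldl (fun d ck => d.insert ck.1 (0 : Int)) PySem.Dict.empty)).items).foldl
          (fun (d : PySem.Dict String Int) p => if p.2 > 0 then d.insert p.1 p.2 else d) PySem.Dict.empty).keys.foldl
        (fun (d : PySem.Dict String (List (List (String × String)))) c =>
          if (items.foldl (fun d item =>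
              interestKeywords.foldl (fun p ck =>
                match firstKw ck.2 (PySem.Str.lower (textOf item)) with
                | some kw => p.modify ck.1 [] (fun l => l ++ [mkCit (PySem.Str.lower (textOf item)) (pvGetD item "url") kw])
                | none => p) d)
            (interestKeywords.foldl (fun d ck => d.insert ck.1 ([] : List (List (String × String)))) PySem.Dict.empty)).getD c [] ≠ []
          then d.insert ("interest_" ++ c)
            ((items.foldl (fun d item =>
                interestKeywords.foldl (fun p ck =>
                  match firstKw ck.2 (PySem.Str.lower (textOf item)) with
                  | some kw => p.modify ck.1 [] (fun l => l ++ [mkCit (PySem.Str.lower (textOf item)) (pvGetD item "url") kw])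
                  | none => p) d)
              (interestKeywords.foldl (fun d ck => d.insert ck.1 ([] : List (List (String × String)))) PySem.Dict.empty)).getD c [])
          else d) PySem.Dict.empty).items := by
  have hndI : (interestKeywords.map Prod.fst).Nodup := by decide
  conv_rhs => rw [Tcats_items interestKeywords hndI items, List.foldl_map]
  have h1 : List.foldl (fun x y =>
        (fun (d : PySem.Dict String Int) p => if p.2 > 0 then d.insert p.1 p.2 else d) x
          ((fun ck => (ck.1, Ttot items ck.2)) y)) PySem.Dict.empty interestKeywords
      = List.foldl (fun d ck => if Ttot items ck.2 > 0 then d.insert ck.1 (Ttot items ck.2) else d)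
          PySem.Dict.empty interestKeywords :=
    PySem.List.foldl_congr_mem _ _ _ _ (fun acc x _ => rfl)
  conv_rhs => rw [h1]
  conv_rhs => rw [keys_condinsert' (fun ck => Ttot items ck.2 > 0) (fun ck => Ttot items ck.2)
    interestKeywords hndI PySem.Dict.empty (fun ck _ => by simp [PySem.Dict.contains_empty])]
  conv_rhs => rw [show (PySem.Dict.empty : PySem.Dict String Int).keys = [] from rfl, List.nil_append,
    List.foldl_map]
  have h2 : List.foldl (fun x y =>
        (fun (d : PySem.Dict String (List (List (String × String)))) c =>
          if (items.foldl (fun d item =>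
              interestKeywords.foldl (fun p ck =>
                match firstKw ck.2 (PySem.Str.lower (textOf item)) with
                | some kw => p.modify ck.1 [] (fun l => l ++ [mkCit (PySem.Str.lower (textOf item)) (pvGetD item "url") kw])
                | none => p) d)
            (interestKeywords.foldl (fun d ck => d.insert ck.1 ([] : List (List (String × String)))) PySem.Dict.empty)).getD c [] ≠ []
          then d.insert ("interest_" ++ c)
            ((items.foldl (fun d item =>
                interestKeywords.foldl (fun p ck =>
                  match firstKw ck.2 (PySem.Str.lower (textOf item)) with
                  | some kw => p.modify ck.1 [] (fun l => l ++ [mkCit (PySem.Str.lower (textOf item)) (pvGetD item "url") kw])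
                  | none => p) d)
              (interestKeywords.foldl (fun d ck => d.insert ck.1 ([] : List (List (String × String)))) PySem.Dict.empty)).getD c [])
          else d) x (Prod.fst y)) PySem.Dict.empty
        (interestKeywords.filter (fun ck => decide (Ttot items ck.2 > 0)))
      = List.foldl (fun d ck =>
          if Ltot ck.2 items ≠ [] then d.insert ("interest_" ++ ck.1) (Ltot ck.2 items) else d)
          PySem.Dict.empty (interestKeywords.filter (fun ck => decide (Ttot items ck.2 > 0))) := by
    apply PySem.List.foldl_congr_mem
    intro acc ck hck
    dsimp only
    rw [TH_getD items ck (List.mem_of_mem_filter hck)]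
  conv_rhs => rw [h2, List.foldl_filter]
  refine congrArg PySem.Dict.items (PySem.List.foldl_congr_mem _ _ _ _ ?_)
  intro acc ck hck
  rw [hcnt ck hck]
  by_cases hT : Ttot items ck.2 > 0 <;> by_cases hL : Ltot ck.2 items = [] <;>
    simp [hT, hL]

-- ===== VERDICT (by name: the statement is the Claim_ definition above) =====
theorem analyze_interests_and_personality_spec : Claim_equal_analyze_interests_and_personality := by
  intro posts comments _
  unfold Spec_analyze_interests_and_personality
  unfold analyze_interests_and_personality analyze_interests_and_personality_alt
  dsimp only
  rw [foldA_eq (posts ++ comments) _ interestKeywords (by decide)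
      (PySem.Dict.empty, PySem.Dict.empty) (fun ck _ => by simp [PySem.Dict.contains_empty])]
  rw [Bsplit (posts ++ comments) _ _ _]
  dsimp only
  have hndI : (interestKeywords.map Prod.fst).Nodup := by decide
  have hndP : (personalityIndicators.map Prod.fst).Nodup := by decide
  have hcntI : ∀ ck ∈ interestKeywords, kwCount (allTextOf (posts ++ comments)) ck.2 = Ttot (posts ++ comments) ck.2 :=
    fun ck hck => kwCount_all (posts ++ comments) ck.2 (by revert ck hck; decide)
  have hcntP : ∀ ti ∈ personalityIndicators, kwCount (allTextOf (posts ++ comments)) ti.2 = Ttot (posts ++ comments) ti.2 :=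
    fun ti hti => kwCount_all (posts ++ comments) ti.2 (by revert ti hti; decide)
  refine Prod.ext ?_ (Prod.ext ?_ ?_)
  · -- interests
    dsimp only
    rw [Tcats_items interestKeywords hndI (posts ++ comments), List.foldl_map]
    refine congrArg PySem.Dict.items (PySem.List.foldl_congr_mem _ _ _ _ ?_)
    intro acc ck hck
    rw [show kwCount (PySem.Str.lower (PySem.Str.join " " ((posts ++ comments).map fun item => textOf item))) ck.2
        = Ttot (posts ++ comments) ck.2 from hcntI ck hck]
  · -- personality
    dsimp only
    rw [Tcats_items personalityIndicators hndP (posts ++ comments), List.foldl_map]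
    refine congrArg PySem.Dict.items (PySem.List.foldl_congr_mem _ _ _ _ ?_)
    intro acc ti hti
    rw [show kwCount (PySem.Str.lower (PySem.Str.join " " ((posts ++ comments).map fun item => textOf item))) ti.2
        = Ttot (posts ++ comments) ti.2 from hcntP ti hti]
  · -- citations
    dsimp only
    exact cit_component (posts ++ comments) hcntI
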